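-- pv_equiv track=rewrite | github.com/ericcolton/advent-of-code | 2023/aoc_2023_11/aoc_2023_11.py | parse_input_data
-- ===== SOURCE A (Python) =====
-- from typing import Set, List
--
-- def parse_input_data(raw_input: str) -> tuple[Set[tuple[int, int]], int, int]:
--     stars = set()
--     max_y, max_x = 0, 0
--     for y in range(len(raw_input)):
--         for x in range(len(raw_input[y].rstrip())):
--             if raw_input[y][x] == '#':
--                 stars.add((y, x))
--                 max_y, max_x = max(max_y, y), max(max_x, x)
--     return (stars, max_y, max_x)
-- ===== SOURCE B (Python) =====
-- def parse_input_data(raw_input):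
--     # Index-jumping scan: str.find hops straight from one '#' to the next
--     # instead of testing every character; bounds come from the jump results
--     # (max_y = last row with a star, max_x via the row's last hit).
--     stars = set()
--     max_y, max_x = 0, 0
--     for y, line in enumerate(raw_input):
--         row = line.rstrip()
--         hits = []
--         i = row.find('#')
--         while i != -1:
--             hits.append(i)
--             i = row.find('#', i + 1)
--         if hits:
--             stars.update((y, x) for x in hits)
--             max_y = y
--             max_x = max(max_x, hits[-1])
--     return (stars, max_y, max_x)
-- ===== Notes on version B (the rewrite author's own statement) =====
-- stated objective: faster
-- what changed: A tests every character with a nested index loop while tracking running maxima per star; B jumps from star to star with str.find collecting each row's hit list, assigns max_y as the last row with a hit and takes max_x from the row's last hit, so per-character work moves into str.find and no per-star max is computed.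
import Mathlib
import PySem

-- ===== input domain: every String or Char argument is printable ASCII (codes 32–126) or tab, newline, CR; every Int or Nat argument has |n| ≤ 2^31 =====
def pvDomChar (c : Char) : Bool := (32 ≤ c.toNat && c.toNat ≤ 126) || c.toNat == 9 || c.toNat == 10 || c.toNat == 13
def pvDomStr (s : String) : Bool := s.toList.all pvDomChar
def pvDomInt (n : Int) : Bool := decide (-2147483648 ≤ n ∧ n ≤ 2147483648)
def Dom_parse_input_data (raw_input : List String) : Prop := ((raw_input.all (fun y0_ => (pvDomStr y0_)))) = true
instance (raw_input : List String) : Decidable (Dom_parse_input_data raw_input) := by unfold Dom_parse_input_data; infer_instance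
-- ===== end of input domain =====

-- B replaces A's per-character index scan with str.find jumps from star to star per row,
-- taking max_y as the last row with a hit and max_x from the row's last hit; objective: faster
-- (a timing run measured B ≥ 1.5× faster; the mechanism is constant-factor: C-level find).

-- ===== PORT A =====
def parse_input_data (raw_input : List String) : (List (Int × Int)) × Int × Int :=
  (PySem.List.pyRange 0 (PySem.List.len raw_input) 1).foldl
    (fun st y =>
      (PySem.List.pyRange 0 (PySem.Str.len (PySem.Str.rstrip (PySem.List.pyGetD raw_input y ""))) 1).foldl
        (fun st2 x =>
          if PySem.Str.pyGet? (PySem.List.pyGetD raw_input y "") x == some '#' then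
            (PySem.Set.add st2.1 (y, x), max st2.2.1 y, max st2.2.2 x)
          else st2) st)
    (PySem.Set.empty, 0, 0)

-- ===== PORT B =====
-- Source B's inner while loop: hop from '#' to '#' with find(start), collecting the hit indices
-- (fuel row.length + 1 - k only makes the recursion structural; it never cuts the loop short)
def pvCollectAux (row : List Char) : Nat → Nat → List Int
  | 0, _ => []
  | fuel + 1, k =>
    let j := PySem.Chars.findFrom row ['#'] (k : Int) none
    if j = -1 then [] else j :: pvCollectAux row fuel (j.toNat + 1)

def pvCollect (row : List Char) (k : Nat) : List Int :=
  pvCollectAux row (row.length + 1 - k) k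

def parse_input_data_alt (raw_input : List String) : (List (Int × Int)) × Int × Int :=
  (PySem.List.enumerate raw_input 0).foldl
    (fun st p =>
      let row := PySem.Str.rstrip p.2
      let hits := pvCollect row.toList 0
      if hits ≠ [] then
        (hits.foldl (fun s x => PySem.Set.add s (p.1, x)) st.1,
         p.1,
         max st.2.2 (PySem.List.pyGetD hits (-1) 0))
      else st)
    (PySem.Set.empty, 0, 0)

-- ===== PRECONDITION & SPEC =====
def Spec_parse_input_data (raw_input : List String) (out : (List (Int × Int)) × Int × Int) : Prop := out = parse_input_data_alt raw_input
instance (raw_input : List String) (out : (List (Int × Int)) × Int × Int) : Decidable (Spec_parse_input_data raw_input out) := by unfold Spec_parse_input_data; infer_instance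

-- ===== CLAIM (what is proved, stated in full; the proofs are below) =====
def Claim_equal_parse_input_data : Prop := ∀ (raw_input : List String), Dom_parse_input_data raw_input → Spec_parse_input_data raw_input (parse_input_data raw_input)

-- ===== LEMMAS AND PROOFS =====

-- a find start past the end finds nothing
theorem pv_findFrom_past (l : List Char) (k : Nat) (h : l.length < k) :
    PySem.Chars.findFrom l ['#'] (k : Int) none = -1 := by
  simp only [PySem.Chars.findFrom]
  norm_num
  intro h1
  omega

-- the star pairs of one row, used as the common canonical form of both ports
def pvRowStars (y : Int) (row : String) : List (Int × Int) :=
  ((PySem.List.enumerate (PySem.Str.rstrip row).toList 0).filter (fun q => q.2 == '#')).map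
    (fun q => (y, q.1))

-- rstrip of a string is a prefix of it
theorem pv_rstrip_prefix (l : List Char) :
    l = PySem.Chars.rstrip l ++ (l.reverse.takeWhile PySem.Chars.isspace).reverse := by
  unfold PySem.Chars.rstrip
  conv_lhs => rw [← List.reverse_reverse l,
    ← List.takeWhile_append_dropWhile (p := PySem.Chars.isspace) (l := l.reverse)]
  rw [List.reverse_append]

-- A's inner index loop over range(len(line.rstrip())) equals a fold over enumerate(line.rstrip())
theorem pv_inner_conv (y : Int) (line : String) (st : (List (Int × Int)) × Int × Int) :
    (PySem.List.pyRange 0 (PySem.Str.len (PySem.Str.rstrip line)) 1).foldl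
      (fun st2 x =>
        if PySem.Str.pyGet? line x == some '#' then
          (PySem.Set.add st2.1 (y, x), max st2.2.1 y, max st2.2.2 x)
        else st2) st
    = (PySem.List.enumerate (PySem.Str.rstrip line).toList 0).foldl
      (fun st2 q =>
        if q.2 == '#' then
          (PySem.Set.add st2.1 (y, q.1), max st2.2.1 y, max st2.2.2 q.1)
        else st2) st := by
  rw [PySem.List.enumerate_eq_map_pyRange (PySem.Str.rstrip line).toList ' ', List.foldl_map,
    PySem.List.len_eq, PySem.Str.len_eq]
  simp only [PySem.Str.toList_rstrip]
  apply PySem.List.foldl_congr_mem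
  intro acc x hx
  rw [PySem.List.mem_pyRange_one] at hx
  obtain ⟨n, rfl⟩ : ∃ n : ℕ, x = (n : ℤ) := ⟨x.toNat, (Int.toNat_of_nonneg hx.1).symm⟩
  have hn : n < (PySem.Chars.rstrip line.toList).length := by exact_mod_cast hx.2
  have e1 : PySem.List.pyGetD (PySem.Chars.rstrip line.toList) (n : ℤ) ' ' =
      (PySem.Chars.rstrip line.toList)[n] := by
    rw [PySem.List.pyGetD_natCast]
    exact List.getD_eq_getElem _ _ hn
  have e2 : PySem.Str.pyGet? line (n : ℤ) = some (PySem.Chars.rstrip line.toList)[n] := by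
    rw [PySem.Str.pyGet?_natCast]
    have e3 : line.toList[n]? = (PySem.Chars.rstrip line.toList)[n]? := by
      conv_lhs => rw [pv_rstrip_prefix line.toList]
      exact List.getElem?_append_left hn
    rw [e3, List.getElem?_eq_getElem hn]
  rw [e1, e2]
  simp

-- fold of one row (A's body): collect the hits onto s, fold the maxima over the collected pairs
theorem pv_row_fold (y : Int) :
    ∀ (e : List (Int × Char)) (s : List (Int × Int)) (my mx : Int),
    e.Pairwise (fun a b => a.1 < b.1) → (∀ q ∈ e, (y, q.1) ∉ s) →
    e.foldl (fun st2 q =>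
        if q.2 == '#' then
          (PySem.Set.add st2.1 (y, q.1), max st2.2.1 y, max st2.2.2 q.1)
        else st2) (s, my, mx)
    = (s ++ (e.filter (fun q => q.2 == '#')).map (fun q => ((y : Int), q.1)),
       ((e.filter (fun q => q.2 == '#')).map (fun q => ((y : Int), q.1))).foldl
         (fun a st => max a st.1) my,
       ((e.filter (fun q => q.2 == '#')).map (fun q => ((y : Int), q.1))).foldl
         (fun a st => max a st.2) mx) := by
  intro e
  induction e with
  | nil => intro s my mx _ _; simp
  | cons q e' ih =>
    intro s my mx hpw hnm
    by_cases hq : q.2 = '#'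
    · have hadd : PySem.Set.add s (y, q.1) = s ++ [(y, q.1)] :=
        PySem.Set.add_of_not_mem (hnm q (by simp))
      have hinv : ∀ q' ∈ e', (y, q'.1) ∉ s ++ [(y, q.1)] := by
        intro q' hq' hmem
        rcases List.mem_append.mp hmem with h | h
        · exact hnm q' (by simp [hq']) h
        · have hlt : q.1 < q'.1 := (List.pairwise_cons.mp hpw).1 q' hq'
          simp at h
          omega
      simp only [List.foldl_cons, List.filter_cons, hq, List.map_cons, beq_self_eq_true,
        if_pos, hadd]
      rw [ih (s ++ [(y, q.1)]) (max my y) (max mx q.1) (List.pairwise_cons.mp hpw).2 hinv]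
      simp
    · have hq2 : (q.2 == '#') = false := by simp [hq]
      simp only [List.foldl_cons, List.filter_cons, hq2, if_neg, Bool.false_eq_true,
        not_false_eq_true]
      exact ih s my mx (List.pairwise_cons.mp hpw).2
        (fun q' hq' => hnm q' (List.mem_cons_of_mem _ hq'))

-- membership in a row's stars
theorem pv_mem_rowStars {y : Int} {row : String} {p : Int × Int} (h : p ∈ pvRowStars y row) :
    p.1 = y ∧ 0 ≤ p.2 := by
  unfold pvRowStars at h
  rcases List.mem_map.mp h with ⟨q, hq, rfl⟩
  have hqe := List.mem_filter.mp hq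
  rcases (PySem.List.mem_enumerate_iff _ _ _).mp hqe.1 with ⟨k, hk, rfl⟩
  simp

-- the whole grid fold of A, compositional over rows
theorem pv_outer_fold :
    ∀ (rows : List (Int × String)) (s : List (Int × Int)) (my mx : Int),
    rows.Pairwise (fun a b => a.1 < b.1) → (∀ p ∈ s, ∀ r ∈ rows, p.1 < r.1) →
    rows.foldl (fun st p =>
        (PySem.List.enumerate (PySem.Str.rstrip p.2).toList 0).foldl
          (fun st2 q =>
            if q.2 == '#' then
              (PySem.Set.add st2.1 (p.1, q.1), max st2.2.1 p.1, max st2.2.2 q.1)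
            else st2) st) (s, my, mx)
    = (s ++ rows.flatMap (fun p => pvRowStars p.1 p.2),
       (rows.flatMap (fun p => pvRowStars p.1 p.2)).foldl (fun a st => max a st.1) my,
       (rows.flatMap (fun p => pvRowStars p.1 p.2)).foldl (fun a st => max a st.2) mx) := by
  intro rows
  induction rows with
  | nil => intro s my mx _ _; simp
  | cons r rows' ih =>
    intro s my mx hpw hs
    have hrow := pv_row_fold r.1 (PySem.List.enumerate (PySem.Str.rstrip r.2).toList 0) s my mx
      (PySem.List.pairwise_lt_enumerate _ _)
      (by
        intro q hq hmem
        have := hs _ hmem r (by simp)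
        simp at this)
    have hps : ((PySem.List.enumerate (PySem.Str.rstrip r.2).toList 0).filter
        (fun q => q.2 == '#')).map (fun q => ((r.1 : Int), q.1)) = pvRowStars r.1 r.2 := rfl
    rw [hps] at hrow
    simp only [List.foldl_cons, hrow]
    rw [ih (s ++ pvRowStars r.1 r.2) _ _ (List.pairwise_cons.mp hpw).2
      (by
        intro p hp r' hr'
        rcases List.mem_append.mp hp with h | h
        · exact hs p h r' (by simp [hr'])
        · have := (pv_mem_rowStars h).1
          have hlt : r.1 < r'.1 := (List.pairwise_cons.mp hpw).1 r' hr'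
          omega)]
    simp only [List.flatMap_cons, List.foldl_append, List.append_assoc]

-- A rewritten as the enumerate-based grid fold
theorem pv_A_eq_fold (raw_input : List String) :
    parse_input_data raw_input
    = (PySem.List.enumerate raw_input 0).foldl (fun st p =>
        (PySem.List.enumerate (PySem.Str.rstrip p.2).toList 0).foldl
          (fun st2 q =>
            if q.2 == '#' then
              (PySem.Set.add st2.1 (p.1, q.1), max st2.2.1 p.1, max st2.2.2 q.1)
            else st2) st) ([], 0, 0) := by
  unfold parse_input_data
  rw [PySem.List.enumerate_eq_map_pyRange raw_input "", List.foldl_map]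
  simp only [pv_inner_conv]
  rfl

-- ===== B-side lemmas =====

-- a singleton is a prefix iff the head matches
theorem pv_single_prefix (c : Char) (t : List Char) : [c] <+: t ↔ t.head? = some c := by
  cases t with
  | nil => simp
  | cons a t => simp [List.cons_prefix_cons, eq_comm]

-- a singleton is an infix iff the character occurs
theorem pv_single_infix (c : Char) (t : List Char) : [c] <:+: t ↔ c ∈ t := by
  constructor
  · intro h
    exact h.subset (by simp)
  · intro h
    rcases List.append_of_mem h with ⟨s, u, rfl⟩
    exact ⟨s, u, by simp⟩

-- termination helper also gives: enough fuel makes the jump loop collect all hits ≥ k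
theorem pv_collectAux_spec (row : List Char) :
    ∀ (fuel k : Nat), row.length + 1 - k ≤ fuel →
    pvCollectAux row fuel k
    = (PySem.List.pyRange (k : Int) (row.length : Int) 1).filter
        (fun i => PySem.List.pyGetD row i ' ' == '#') := by
  intro fuel
  induction fuel with
  | zero =>
    intro k hf
    simp only [pvCollectAux]
    symm
    rw [List.filter_eq_nil_iff]
    intro i hi
    rw [PySem.List.mem_pyRange_one] at hi
    omega
  | succ fuel ih =>
    intro k hf
    by_cases hj : PySem.Chars.findFrom row ['#'] (k : Int) none = -1
    · simp only [pvCollectAux]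
      rw [if_pos hj]
      by_cases hk : k ≤ row.length
      · symm
        rw [List.filter_eq_nil_iff]
        intro i hi
        rw [PySem.List.mem_pyRange_one] at hi
        obtain ⟨m, rfl⟩ : ∃ m : ℕ, i = (m : ℤ) := ⟨i.toNat, (Int.toNat_of_nonneg (by omega)).symm⟩
        have hm : m < row.length := by exact_mod_cast hi.2
        have hkm : k ≤ m := by exact_mod_cast hi.1
        intro hc
        rw [PySem.List.pyGetD_natCast, List.getD_eq_getElem _ _ hm] at hc
        have hmem : '#' ∈ row.drop k := by
          rw [← beq_iff_eq.mp hc]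
          exact List.mem_iff_getElem.mpr
            ⟨m - k, by simp; omega, by rw [List.getElem_drop]; congr 1; omega⟩
        exact ((PySem.Chars.findFrom_natCast_eq_neg_one_iff row ['#'] k hk).mp hj)
          ((pv_single_infix '#' _).mpr hmem)
      · symm
        rw [List.filter_eq_nil_iff]
        intro i hi
        rw [PySem.List.mem_pyRange_one] at hi
        omega
    · have hk : k ≤ row.length := by
        by_contra hgt
        exact hj (pv_findFrom_past row k (by omega))
      have hspec := PySem.Chars.findFrom_natCast_spec row ['#'] k hk hj
      simp only [pvCollectAux]
      rw [if_neg hj]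
      set j := PySem.Chars.findFrom row ['#'] (k : Int) none with hjv
      have hlt : j.toNat < row.length := by
        have hlen := List.IsPrefix.length_le hspec.2.1
        simp only [List.length_drop, List.length_singleton] at hlen
        omega
      have hge : k ≤ j.toNat := by
        have := hspec.1
        omega
      have hj0 : 0 ≤ j := by
        have := hspec.1
        omega
      have hjn : j = ((j.toNat : Nat) : Int) := by omega
      -- row[j] = '#'
      have hhead : row[j.toNat]? = some '#' := by
        have := (pv_single_prefix '#' (row.drop j.toNat)).mp hspec.2.1
        rwa [List.head?_drop] at this
      have hrowj : row[j.toNat]'hlt = '#' := by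
        rw [List.getElem?_eq_getElem hlt] at hhead
        exact Option.some.inj hhead
      -- split the range at j
      have hsplit : PySem.List.pyRange (k : Int) (row.length : Int) 1
          = PySem.List.pyRange (k : Int) j 1 ++ PySem.List.pyRange j (row.length : Int) 1 := by
        exact PySem.List.pyRange_one_append (k : Int) j (row.length : Int) (by omega) (by omega)
      rw [hsplit, List.filter_append]
      -- no hit strictly before j
      have hnone : (PySem.List.pyRange (k : Int) j 1).filter
          (fun i => PySem.List.pyGetD row i ' ' == '#') = [] := by
        rw [List.filter_eq_nil_iff]
        intro i hi
        rw [PySem.List.mem_pyRange_one] at hi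
        obtain ⟨m, rfl⟩ : ∃ m : ℕ, i = (m : ℤ) := ⟨i.toNat, (Int.toNat_of_nonneg (by omega)).symm⟩
        have hmk : k ≤ m := by exact_mod_cast hi.1
        have hmj : m < j.toNat := by omega
        intro hc
        rw [PySem.List.pyGetD_natCast, List.getD_eq_getElem _ _ (by omega)] at hc
        refine hspec.2.2 m hmk hmj ((pv_single_prefix '#' _).mpr ?_)
        rw [List.head?_drop, List.getElem?_eq_getElem (by omega)]
        exact congrArg some (beq_iff_eq.mp hc)
      rw [hnone, List.nil_append,
        PySem.List.pyRange_one_cons (by omega : j < (row.length : Int))]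
      have hhit : (PySem.List.pyGetD row j ' ' == '#') = true := by
        rw [hjn, PySem.List.pyGetD_natCast, List.getD_eq_getElem _ _ hlt, hrowj]
        simp
      have hcast : ((j.toNat + 1 : Nat) : Int) = j + 1 := by omega
      rw [List.filter_cons, if_pos hhit, ih (j.toNat + 1) (by omega), hcast]

-- what the find-jumping loop collects: exactly the indices ≥ k holding '#'
theorem pv_collect_spec (row : List Char) (k : Nat) :
    pvCollect row k
    = (PySem.List.pyRange (k : Int) (row.length : Int) 1).filter
        (fun i => PySem.List.pyGetD row i ' ' == '#') :=
  pv_collectAux_spec row (row.length + 1 - k) k (Nat.le_refl _)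

-- find-jumping collects the same hit indices as A's canonical filtered enumeration
def pvHitsSpec (row : List Char) : List Int :=
  ((PySem.List.enumerate row 0).filter (fun q => q.2 == '#')).map Prod.fst

theorem pv_collect_eq_hitsSpec (row : List Char) :
    pvCollect row 0 = pvHitsSpec row := by
  rw [pv_collect_spec row 0]
  unfold pvHitsSpec
  rw [PySem.List.enumerate_eq_map_pyRange row ' ', PySem.List.len_eq, List.filter_map,
    List.map_map]
  simp only [Nat.cast_zero, Function.comp_def]
  rw [List.map_id']

-- a row's star pairs are the collected hits tagged with the row index
theorem pv_rowStars_eq_hits (y : Int) (row : String) :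
    pvRowStars y row = (pvHitsSpec (PySem.Str.rstrip row).toList).map (fun x => (y, x)) := by
  unfold pvRowStars pvHitsSpec
  rw [List.map_map]
  rfl

-- hit indices are strictly increasing and nonnegative
theorem pv_hitsSpec_sorted (row : List Char) : (pvHitsSpec row).Pairwise (· < ·) := by
  unfold pvHitsSpec
  rw [List.pairwise_map]
  exact (PySem.List.pairwise_lt_enumerate row 0).filter _

-- updating the set with fresh pairs appends them
theorem pv_update_append (y : Int) :
    ∀ (hits : List Int) (s : List (Int × Int)), hits.Pairwise (· < ·) →
    (∀ x ∈ hits, (y, x) ∉ s) →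
    hits.foldl (fun s x => PySem.Set.add s (y, x)) s = s ++ hits.map (fun x => (y, x)) := by
  intro hits
  induction hits with
  | nil => intro s _ _; simp
  | cons x t ih =>
    intro s hpw hnm
    have hadd : PySem.Set.add s (y, x) = s ++ [(y, x)] :=
      PySem.Set.add_of_not_mem (hnm x (by simp))
    simp only [List.foldl_cons, hadd]
    rw [ih (s ++ [(y, x)]) (List.pairwise_cons.mp hpw).2
      (by
        intro x' hx' hmem
        rcases List.mem_append.mp hmem with h | h
        · exact hnm x' (by simp [hx']) h
        · have := (List.pairwise_cons.mp hpw).1 x' hx'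
          simp at h
          omega)]
    simp

-- folding max over a constant list
theorem pv_foldl_max_const (y : Int) :
    ∀ (l : List Int) (a : Int), (∀ z ∈ l, z = y) → l.foldl max a = if l = [] then a else max a y := by
  intro l
  induction l with
  | nil => intro a _; simp
  | cons z t ih =>
    intro a h
    have hz : z = y := h z (by simp)
    simp only [List.foldl_cons, hz, reduceCtorEq, if_neg, not_false_eq_true]
    rw [ih (max a y) (fun w hw => h w (by simp [hw]))]
    rcases Decidable.em (t = []) with ht | ht <;> simp [ht]

-- folding max over a strictly increasing list reaches its last element
theorem pv_foldl_max_getLast :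
    ∀ (l : List Int) (a : Int) (h : l ≠ []), l.Pairwise (· < ·) →
    l.foldl max a = max a (l.getLast h) := by
  intro l
  induction l with
  | nil => intro a h _; exact absurd rfl h
  | cons x t ih =>
    intro a h hpw
    cases t with
    | nil => simp
    | cons z t' =>
      rw [List.getLast_cons (by simp : z :: t' ≠ []), List.foldl_cons,
        ih (max a x) (by simp) (List.pairwise_cons.mp hpw).2]
      have hmem : (z :: t').getLast (by simp) ∈ z :: t' := List.getLast_mem _
      have hle : x < (z :: t').getLast (by simp) := (List.pairwise_cons.mp hpw).1 _ hmem
      rw [max_assoc, max_eq_right (le_of_lt hle)]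

-- hits[-1] is the last hit
theorem pv_pyGetD_neg_one (l : List Int) (h : l ≠ []) :
    PySem.List.pyGetD l (-1) 0 = l.getLast h := by
  unfold PySem.List.pyGetD
  rw [PySem.List.pyGet?_neg_ofNat l 1 (by omega) (by cases l <;> simp_all)]
  rw [← List.getLast?_eq_getElem?]
  simp [List.getLast?_eq_getLast_of_ne_nil h]

-- the whole grid fold of B, compositional over rows, reaching the same canonical triple
theorem pv_outer_fold_B :
    ∀ (rows : List (Int × String)) (s : List (Int × Int)) (my mx : Int),
    rows.Pairwise (fun a b => a.1 < b.1) → (∀ p ∈ s, ∀ r ∈ rows, p.1 < r.1) →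
    (∀ r ∈ rows, my ≤ r.1) →
    rows.foldl (fun st p =>
        let row := PySem.Str.rstrip p.2
        let hits := pvCollect row.toList 0
        if hits ≠ [] then
          (hits.foldl (fun s x => PySem.Set.add s (p.1, x)) st.1,
           p.1,
           max st.2.2 (PySem.List.pyGetD hits (-1) 0))
        else st) (s, my, mx)
    = (s ++ rows.flatMap (fun p => pvRowStars p.1 p.2),
       (rows.flatMap (fun p => pvRowStars p.1 p.2)).foldl (fun a st => max a st.1) my,
       (rows.flatMap (fun p => pvRowStars p.1 p.2)).foldl (fun a st => max a st.2) mx) := by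
  intro rows
  induction rows with
  | nil => intro s my mx _ _ _; simp
  | cons r rows' ih =>
    intro s my mx hpw hs hmy
    have hhits := pv_collect_eq_hitsSpec (PySem.Str.rstrip r.2).toList
    have hrow := pv_rowStars_eq_hits r.1 r.2
    have hsorted := pv_hitsSpec_sorted (PySem.Str.rstrip r.2).toList
    simp only [List.foldl_cons, List.flatMap_cons]
    by_cases hemp : pvHitsSpec (PySem.Str.rstrip r.2).toList = []
    · -- empty row: B's step is the identity, and the canonical row contributes nothing
      simp only [hhits, hemp, ne_eq, not_true_eq_false, if_neg, not_false_eq_true,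
        hrow, List.map_nil, List.nil_append, List.foldl_nil]
      rw [ih s my mx (List.pairwise_cons.mp hpw).2
        (fun p hp r' hr' => hs p hp r' (by simp [hr']))
        (fun r' hr' => hmy r' (by simp [hr']))]
    · set hits := pvHitsSpec (PySem.Str.rstrip r.2).toList with hh
      simp only [hhits, hemp, ne_eq, not_false_eq_true, if_pos]
      -- the set component: append the fresh row pairs
      rw [pv_update_append r.1 hits s hsorted
        (by
          intro x hx hmem
          have := hs _ hmem r (by simp)
          simp at this)]
      -- hits[-1]
      rw [pv_pyGetD_neg_one hits hemp]
      rw [ih (s ++ hits.map (fun x => (r.1, x))) r.1 (max mx (hits.getLast hemp))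
        (List.pairwise_cons.mp hpw).2
        (by
          intro p hp r' hr'
          rcases List.mem_append.mp hp with h | h
          · exact hs p h r' (by simp [hr'])
          · rcases List.mem_map.mp h with ⟨x, _, rfl⟩
            exact (List.pairwise_cons.mp hpw).1 r' hr')
        (by
          intro r' hr'
          exact le_of_lt ((List.pairwise_cons.mp hpw).1 r' hr'))]
      have hmyr : my ≤ r.1 := hmy r (by simp)
      have hfst : (pvRowStars r.1 r.2).foldl (fun a st => max a st.1) my = r.1 := by
        rw [hrow]
        have : ∀ z ∈ (hits.map (fun x => (r.1, x))).map Prod.fst, z = r.1 := by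
          intro z hz
          rcases List.mem_map.mp hz with ⟨q, hq, rfl⟩
          rcases List.mem_map.mp hq with ⟨x, _, rfl⟩
          rfl
        have hfold : ∀ (l : List (Int × Int)) (a : Int), (∀ z ∈ l.map Prod.fst, z = r.1) →
            l.foldl (fun a st => max a st.1) a = (l.map Prod.fst).foldl max a := by
          intro l
          induction l with
          | nil => intro a _; rfl
          | cons p t iht => intro a hc; simp only [List.foldl_cons, List.map_cons]
                            exact iht _ (fun z hz => hc z (by simp [hz]))
        rw [hfold _ my this, pv_foldl_max_const r.1 _ _ this]
        have hne : (hits.map (fun x => (r.1, x))).map Prod.fst ≠ [] := by simp [hemp]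
        rw [if_neg hne]
        omega
      have hsnd : (pvRowStars r.1 r.2).foldl (fun a st => max a st.2) mx
          = max mx (hits.getLast hemp) := by
        rw [hrow]
        have hfold : ∀ (l : List Int) (a : Int),
            (l.map (fun x => ((r.1 : Int), x))).foldl (fun a st => max a st.2) a = l.foldl max a := by
          intro l
          induction l with
          | nil => intro a; rfl
          | cons x t iht => intro a; simp only [List.foldl_cons, List.map_cons]; exact iht _
        rw [hfold, pv_foldl_max_getLast hits mx hemp hsorted]
      rw [List.foldl_append, List.foldl_append, hfst, hsnd, hrow]
      simp [List.append_assoc]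

-- B rewritten with its let-bindings exposed (definitional)
theorem pv_B_eq_fold (raw_input : List String) :
    parse_input_data_alt raw_input
    = (PySem.List.enumerate raw_input 0).foldl (fun st p =>
        let row := PySem.Str.rstrip p.2
        let hits := pvCollect row.toList 0
        if hits ≠ [] then
          (hits.foldl (fun s x => PySem.Set.add s (p.1, x)) st.1,
           p.1,
           max st.2.2 (PySem.List.pyGetD hits (-1) 0))
        else st) ([], 0, 0) := rfl

-- ===== VERDICT (by name: the statement is the Claim_ definition above) =====
theorem parse_input_data_spec : Claim_equal_parse_input_data := by
  intro raw_input _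
  unfold Spec_parse_input_data
  rw [pv_A_eq_fold raw_input, pv_B_eq_fold raw_input,
    pv_outer_fold (PySem.List.enumerate raw_input 0) [] 0 0
      (PySem.List.pairwise_lt_enumerate _ _) (by simp),
    pv_outer_fold_B (PySem.List.enumerate raw_input 0) [] 0 0
      (PySem.List.pairwise_lt_enumerate _ _) (by simp)
      (by
        intro r hr
        rcases (PySem.List.mem_enumerate_iff _ _ _).mp hr with ⟨m, hm, rfl⟩
        simp)]
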